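-- pv_equiv track=rewrite | github.com/JKHira/sdsl2_coder | scripts/addendum_check.py | _strip_strings
-- ===== SOURCE A (Python) =====
-- def _strip_strings(text: str) -> str:
--     out = []
--     in_str = False
--     escape = False
--     for ch in text:
--         if in_str:
--             if escape:
--                 escape = False
--                 continue
--             if ch == "\\":
--                 escape = True
--                 continue
--             if ch == '"':
--                 in_str = False
--             continue
--         if ch == '"':
--             in_str = True
--             continue
--         out.append(ch)
--     return "".join(out)
-- ===== SOURCE B (Python) =====
-- def _strip_strings(text: str) -> str:
--     # Skip-scanner: copy chars until a quote, then jump over the whole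
--     # string literal (backslash consumes two chars) before resuming.
--     res = []
--     i = 0
--     n = len(text)
--     while i < n:
--         ch = text[i]
--         if ch == '"':
--             i += 1
--             while i < n:
--                 c = text[i]
--                 if c == '\\':
--                     i += 2
--                 elif c == '"':
--                     i += 1
--                     break
--                 else:
--                     i += 1
--         else:
--             res.append(ch)
--             i += 1
--     return ''.join(res)
-- ===== Notes on version B (the rewrite author's own statement) =====
-- stated objective: alternative
-- what changed: Replaced the flat character-by-character state machine with boolean in_str/escape flags by a two-level skip-scanner that copies characters until a quote and then jumps over the whole string literal (a backslash consumes two positions) with an inner loop, keeping no flag state.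
import Mathlib
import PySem

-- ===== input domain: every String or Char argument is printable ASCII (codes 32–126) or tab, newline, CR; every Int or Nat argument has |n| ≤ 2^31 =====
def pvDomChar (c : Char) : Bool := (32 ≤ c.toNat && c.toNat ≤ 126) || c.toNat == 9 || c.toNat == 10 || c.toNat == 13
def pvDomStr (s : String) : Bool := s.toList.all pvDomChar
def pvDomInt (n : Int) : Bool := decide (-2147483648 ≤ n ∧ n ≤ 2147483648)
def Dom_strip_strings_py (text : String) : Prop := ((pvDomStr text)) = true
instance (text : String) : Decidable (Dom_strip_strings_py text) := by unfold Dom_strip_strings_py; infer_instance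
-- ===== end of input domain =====

-- B replaces A's flag-based state machine by a skip-scanner (inner loop jumps over each string literal); same behaviour, alternative structure.

-- ===== PORT A =====
-- one step of A's for-loop: state = (out, in_str, escape)
def pvStepA (st : List Char × Bool × Bool) (ch : Char) : List Char × Bool × Bool :=
  match st with
  | (out, in_str, escape) =>
    if in_str then
      if escape then (out, in_str, false)
      else if ch = '\\' then (out, in_str, true)
      else if ch = '"' then (out, false, escape)
      else (out, in_str, escape)
    else if ch = '"' then (out, true, escape)
    else (out ++ [ch], in_str, escape)

def strip_strings_py (text : String) : String :=
  String.mk (text.toList.foldl pvStepA ([], false, false)).1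

-- ===== PORT B =====
-- inner while loop of B: skip the body of a string literal, return the rest
def pvSkipStr : List Char → List Char
  | [] => []
  | c :: rest =>
    if c = '\\' then
      match rest with
      | [] => []
      | _ :: r => pvSkipStr r
    else if c = '"' then rest
    else pvSkipStr rest

theorem pvSkipStr_length_le (l : List Char) : (pvSkipStr l).length ≤ l.length := by
  fun_induction pvSkipStr <;> simp_all <;> omega

-- outer while loop of B
def pvGoB : List Char → List Char
  | [] => []
  | c :: rest =>
    if c = '"' then pvGoB (pvSkipStr rest)
    else c :: pvGoB rest
termination_by l => l.length
decreasing_by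
  · exact Nat.lt_succ_of_le (pvSkipStr_length_le rest)
  · simp

def strip_strings_py_alt (text : String) : String :=
  String.mk (pvGoB text.toList)

-- ===== PRECONDITION & SPEC =====
def Spec_strip_strings_py (text : String) (out : String) : Prop := out = strip_strings_py_alt text
instance (text : String) (out : String) : Decidable (Spec_strip_strings_py text out) := by unfold Spec_strip_strings_py; infer_instance

-- ===== CLAIM (what is proved, stated in full; the proofs are below) =====
def Claim_equal_strip_strings_py : Prop := ∀ (text : String), Dom_strip_strings_py text → Spec_strip_strings_py text (strip_strings_py text)

-- ===== LEMMAS AND PROOFS =====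
-- unfolding lemmas for pvSkipStr (its nested match blocks simp's own equations)
theorem pvSkipStr_bs (d : Char) (r : List Char) : pvSkipStr ('\\' :: d :: r) = pvSkipStr r := by
  rw [pvSkipStr.eq_def]; simp

theorem pvSkipStr_bs_nil : pvSkipStr ['\\'] = [] := by
  rw [pvSkipStr.eq_def]; simp

theorem pvSkipStr_quote (r : List Char) : pvSkipStr ('"' :: r) = r := by
  rw [pvSkipStr.eq_def]; simp

theorem pvSkipStr_other (c : Char) (r : List Char) (hb : ¬ c = '\\') (hc : ¬ c = '"') :
    pvSkipStr (c :: r) = pvSkipStr r := by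
  rw [pvSkipStr.eq_def]; simp [hb, hc]

-- The two loop shapes agree: A's fold from (out,false,false) produces out ++ pvGoB l,
-- and from inside a string (out,true,false) it produces out ++ pvGoB (pvSkipStr l).
theorem pv_main (n : Nat) : ∀ l : List Char, l.length ≤ n →
    (∀ out : List Char, (List.foldl pvStepA (out, false, false) l).1 = out ++ pvGoB l) ∧
    (∀ out : List Char, (List.foldl pvStepA (out, true, false) l).1 = out ++ pvGoB (pvSkipStr l)) := by
  induction n with
  | zero =>
    intro l hl
    have : l = [] := List.length_eq_zero_iff.mp (Nat.le_zero.mp hl)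
    subst this
    simp [pvGoB, pvSkipStr]
  | succ n ih =>
    intro l hl
    cases l with
    | nil => simp [pvGoB, pvSkipStr]
    | cons c rest =>
      have hr : rest.length ≤ n := by simpa using Nat.lt_succ_iff.mp (Nat.lt_of_lt_of_le (by simp) hl)
      constructor
      · intro out
        by_cases hc : c = '"'
        · simp only [List.foldl]
          simp [pvStepA, hc]
          rw [(ih rest hr).2 out]
          simp [pvGoB]
        · simp only [List.foldl]
          simp [pvStepA, hc]
          rw [(ih rest hr).1 (out ++ [c])]
          simp [pvGoB, hc]
      · intro out
        by_cases hb : c = '\\'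
        · cases rest with
          | nil =>
            subst hb
            simp [List.foldl, pvStepA, pvSkipStr_bs_nil, pvGoB]
          | cons d r =>
            have hr2 : r.length ≤ n := by simp at hl; omega
            simp only [List.foldl]
            simp [pvStepA, hb]
            rw [(ih r hr2).2 out]
            subst hb
            simp [pvSkipStr_bs]
        · by_cases hc : c = '"'
          · simp only [List.foldl]
            simp [pvStepA, hc]
            rw [(ih rest hr).1 out]
            subst hc
            simp [pvSkipStr_quote]
          · simp only [List.foldl]
            simp [pvStepA, hb, hc]
            rw [(ih rest hr).2 out]
            simp [pvSkipStr_other c rest hb hc]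

-- ===== VERDICT (by name: the statement is the Claim_ definition above) =====
theorem strip_strings_py_spec : Claim_equal_strip_strings_py := by
  intro text _
  unfold Spec_strip_strings_py strip_strings_py strip_strings_py_alt
  rw [(pv_main text.toList.length text.toList le_rfl).1 []]
  simp
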